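-- pv_equiv track=rewrite | github.com/lpc477/Leet | datadog_tags.py | dog_tags
-- ===== SOURCE A (Python) =====
-- def dog_tags(stream):
--     result = {}
--     for line in stream:
--         tags = line.split(",")
--         for tag in tags:
--             if tag in list(result.keys()):
--                 value = result[tag] + 1
--                 result[tag] = value
--             else:
--                 result[tag] = 1
--     return result
-- ===== SOURCE B (Python) =====
-- def dog_tags(stream):
--     flat = [tag for line in stream for tag in line.split(",")]
--     return {tag: flat.count(tag) for tag in dict.fromkeys(flat)}
-- ===== Notes on version B (the rewrite author's own statement) =====
-- stated objective: alternative
-- what changed: A increments a dict inside nested loops, re-materialising list(result.keys()) for a linear membership scan on every tag; B flattens all tags into one list, deduplicates it in first-occurrence order with dict.fromkeys, and builds the result in one comprehension counting each distinct tag with list.count.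
import Mathlib
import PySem

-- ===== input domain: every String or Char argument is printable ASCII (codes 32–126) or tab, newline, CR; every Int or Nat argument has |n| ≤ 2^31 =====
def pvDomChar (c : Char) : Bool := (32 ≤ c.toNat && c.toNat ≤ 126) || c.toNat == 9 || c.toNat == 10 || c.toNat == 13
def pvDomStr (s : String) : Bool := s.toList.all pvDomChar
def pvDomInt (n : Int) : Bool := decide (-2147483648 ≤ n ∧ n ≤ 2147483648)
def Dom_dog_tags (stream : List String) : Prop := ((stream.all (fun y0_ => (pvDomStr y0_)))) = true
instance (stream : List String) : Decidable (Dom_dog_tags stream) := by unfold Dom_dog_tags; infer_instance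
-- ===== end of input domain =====

-- B replaces A's nested loops with quadratic key-list membership scans by flatten → ordered dedup → count-per-distinct-tag (alternative decomposition).


-- ===== PORT A =====
-- line.split(",") ; sep ≠ "" so split? is always some
def dog_tags (stream : List String) : List (String × Int) :=
  (stream.foldl (fun result line =>
      let tags := (PySem.Str.split? line ",").getD []
      tags.foldl (fun result tag =>
        if (PySem.Dict.keys result).contains tag then
          let value := (PySem.Dict.get? result tag).getD 0 + 1
          PySem.Dict.insert result tag value
        else
          PySem.Dict.insert result tag 1) result)
    PySem.Dict.empty).items

-- ===== PORT B =====
def dog_tags_alt (stream : List String) : List (String × Int) :=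
  let flat := stream.flatMap (fun line => (PySem.Str.split? line ",").getD [])
  (PySem.List.dedup flat).map (fun tag => (tag, (flat.count tag : Int)))

-- ===== PRECONDITION & SPEC =====
def Spec_dog_tags (stream : List String) (out : List (String × Int)) : Prop := out = dog_tags_alt stream
instance (stream : List String) (out : List (String × Int)) : Decidable (Spec_dog_tags stream out) := by unfold Spec_dog_tags; infer_instance

-- ===== CLAIM (what is proved, stated in full; the proofs are below) =====
def Claim_equal_dog_tags : Prop := ∀ (stream : List String), Dom_dog_tags stream → Spec_dog_tags stream (dog_tags stream)

-- ===== LEMMAS AND PROOFS =====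

-- A's loop body (membership test on the key list, then increment-or-initialise) is the canonical counter step.
lemma dog_tags_step_eq (d : PySem.Dict String Int) (t : String) :
    (if (PySem.Dict.keys d).contains t then
        PySem.Dict.insert d t ((PySem.Dict.get? d t).getD 0 + 1)
      else
        PySem.Dict.insert d t 1)
      = PySem.Dict.insert d t (PySem.Dict.getD d t 0 + 1) := by
  by_cases h : t ∈ d.keys
  · simp [h, PySem.Dict.getD]
  · simp [h, PySem.Dict.getD, (PySem.Dict.get?_eq_none_iff_not_mem_keys d t).mpr h]

-- ===== VERDICT (by name: the statement is the Claim_ definition above) =====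
theorem dog_tags_spec : Claim_equal_dog_tags := by
  intro stream _
  show dog_tags stream = dog_tags_alt stream
  unfold dog_tags dog_tags_alt
  rw [show (fun (result : PySem.Dict String Int) (line : String) =>
        ((PySem.Str.split? line ",").getD []).foldl (fun result tag =>
          if (PySem.Dict.keys result).contains tag then
            PySem.Dict.insert result tag ((PySem.Dict.get? result tag).getD 0 + 1)
          else
            PySem.Dict.insert result tag 1) result)
      = (fun result line => ((PySem.Str.split? line ",").getD []).foldl
          (fun d t => PySem.Dict.insert d t (PySem.Dict.getD d t 0 + 1)) result)
      from funext fun d => funext fun line => by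
        simp only [dog_tags_step_eq]]
  rw [← List.foldl_flatMap]
  rw [PySem.Dict.foldl_insert_getD_add_one_eq_counter, PySem.Dict.items_counter]
  simp [PySem.List.dedup_eq_ofList]
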